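-- pv_equiv track=rewrite | github.com/miliar/Code_Jam_Webscraper | solutions_python/Problem_75/818.py | solve_me
-- ===== SOURCE A (Python) =====
-- def formatted_list(listy):
--     lenny = len(listy)
--     count = 1
--     stringy = "["
--     for l in listy:
--         stringy += l
--         if count < lenny:
--             stringy+=", "
--         count += 1
--     stringy += "]"
--     return stringy
--
-- def solve_me(c_list, o_list, spell):
--   output_list = []
--   cl = len(c_list)
--   ol = len(o_list)
--   for s in spell:
--       output_list.append(s)
--       # check output_list for combos
--       l = len(output_list)
--       if l > 1 and cl > 0:
--           a = output_list[l-1] # last element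
--           b = output_list[l-2] # second to last element
--           for c in c_list:
--               if (a == c[0] and b == c[1]) or (a == c[1] and b == c[0]):
--                   # delete both and create new entry
--                   del(output_list[l-1])
--                   del(output_list[l-2])
--                   output_list.append(c[2])
--       l = len(output_list)
--       if l > 1 and ol > 0:
--           for o in o_list:
--               if o[0] in output_list and o[1] in output_list:
--               # what if d[0] and d[1] are the same?
--               # element cant be opposed to itself, so scratch that...
--                   del(output_list[:])
--
--
--   return formatted_list(output_list)
-- ===== SOURCE B (Python) =====
-- def solve_me(c_list, o_list, spell):
--     comb = {}
--     for c in c_list: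
--         if len(c) >= 3:
--             comb[c[0] + c[1]] = c[2]
--             comb[c[1] + c[0]] = c[2]
--     pairs = [(o[0], o[1]) for o in o_list if len(o) >= 2] \
--           + [(o[1], o[0]) for o in o_list if len(o) >= 2]
--     opp = {}
--     for x, y in pairs:
--         opp.setdefault(x, []).append(y)
--     stack = []
--     danger = {}   # inverted index: d -> number of current stack elements opposed to d
--     for ch in spell:
--         if stack and ch + stack[-1] in comb:
--             t = stack.pop()
--             for d in opp.get(t, ()):
--                 danger[d] -= 1
--             ch = comb[ch + t]
--         if stack and danger.get(ch, 0) > 0: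
--             stack = []
--             danger = {}
--         else:
--             stack.append(ch)
--             for d in opp.get(ch, ()):
--                 danger[d] = danger.get(d, 0) + 1
--     return "[" + ", ".join(stack) + "]"
-- ===== Notes on version B (the rewrite author's own statement) =====
-- stated objective: faster
-- what changed: B precomputes the rules into dicts and replaces A's post-push scans (every combine rule per character, then every oppose rule with whole-stack membership tests) by an inverted 'danger' index - a dict mapping each element to the number of current stack members opposed to it, updated incrementally when elements are pushed or popped - so combining is one pair-keyed lookup and a wipe is detected by one danger lookup on the incoming element before it is pushed.
-- outside the precondition, e.g. on solve_me(['ab'], [], 'xy'): A returns '[x, y]', B returns '[x, y]'; on solve_me([], ['z'], 'xy'): A returns '[x, y]', B returns '[x, y]'; on solve_me(['aaX', 'aaY'], [], 'ab'): A returns '[a, b]', B returns '[a, b]'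
import Mathlib
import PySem

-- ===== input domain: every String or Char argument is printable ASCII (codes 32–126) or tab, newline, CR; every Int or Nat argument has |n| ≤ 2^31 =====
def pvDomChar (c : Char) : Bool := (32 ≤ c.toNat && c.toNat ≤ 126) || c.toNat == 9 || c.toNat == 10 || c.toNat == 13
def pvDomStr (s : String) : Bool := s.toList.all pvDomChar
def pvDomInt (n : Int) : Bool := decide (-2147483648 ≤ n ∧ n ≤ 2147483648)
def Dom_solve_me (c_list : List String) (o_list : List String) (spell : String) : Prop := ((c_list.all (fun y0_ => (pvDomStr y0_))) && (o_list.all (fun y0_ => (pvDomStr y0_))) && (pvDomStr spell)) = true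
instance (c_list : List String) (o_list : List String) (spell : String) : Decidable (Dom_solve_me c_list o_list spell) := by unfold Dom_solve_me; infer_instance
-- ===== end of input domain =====

-- B precomputes the rules into dicts and, instead of A's post-push scans (every combine rule, then
-- every oppose rule with whole-stack membership tests), maintains an inverted 'danger' index
-- (element -> number of current stack members opposed to it, updated incrementally on push/pop),
-- so each character is handled by single dict lookups; equivalent on Pre_ below.

-- ===== PORT A =====
-- s[i] on a python str; only evaluated at in-range positions under Pre_ (out of range = IndexError in A)
def chA (s : String) (i : Nat) : Char := s.toList.getD i ' '

-- formatted_list, transliterated (string built char by char; count tracks the 1-based position)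
def fmtA (listy : List Char) : String :=
  let lenny := listy.length
  let r := listy.foldl (fun (p : List Char × Nat) l =>
    let stringy := p.1 ++ [l]
    let stringy := if p.2 < lenny then stringy ++ [',', ' '] else stringy
    (stringy, p.2 + 1)) (['['], 1)
  String.mk (r.1 ++ [']'])

-- the body of A's `for s in spell` loop; `del output_list[i]` is eraseIdx (the stale indices l-1,
-- l-2 are in range under Pre_, where at most one combine rule can match per character)
def stepA (c_list : List String) (o_list : List String) (output_list : List Char) (s : Char) : List Char :=
  let output_list := output_list ++ [s]
  let l := output_list.length
  let output_list :=
    if 1 < l ∧ 0 < c_list.length then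
      let a := output_list.getD (l-1) ' '
      let b := output_list.getD (l-2) ' '
      c_list.foldl (fun acc c =>
        if (a = chA c 0 ∧ b = chA c 1) ∨ (a = chA c 1 ∧ b = chA c 0) then
          ((acc.eraseIdx (l-1)).eraseIdx (l-2)) ++ [chA c 2]
        else acc) output_list
    else output_list
  let l := output_list.length
  if 1 < l ∧ 0 < o_list.length then
    o_list.foldl (fun acc o => if chA o 0 ∈ acc ∧ chA o 1 ∈ acc then [] else acc) output_list
  else output_list

def solve_me (c_list : List String) (o_list : List String) (spell : String) : String :=
  fmtA (spell.toList.foldl (stepA c_list o_list) [])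

-- ===== PORT B =====
-- if len(c) >= 3: comb[c[0]+c[1]] = c[2]; comb[c[1]+c[0]] = c[2]  (the 2-char key is a Char pair)
def buildC (c_list : List String) : PySem.Dict (Char × Char) Char :=
  c_list.foldl (fun d c =>
    if 3 ≤ c.toList.length then
      (d.insert (chA c 0, chA c 1) (chA c 2)).insert (chA c 1, chA c 0) (chA c 2)
    else d) PySem.Dict.empty

-- pairs = [(o[0],o[1]) for o if len(o) >= 2] + [(o[1],o[0]) ...]; opp.setdefault(x, []).append(y)
def buildO (o_list : List String) : PySem.Dict Char (List Char) :=
  let ok := o_list.filter (fun o => decide (2 ≤ o.toList.length))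
  let pairs := ok.map (fun o => (chA o 0, chA o 1)) ++ ok.map (fun o => (chA o 1, chA o 0))
  pairs.foldl (fun d p => d.modify p.1 [] (· ++ [p.2])) PySem.Dict.empty

-- for d in opp.get(t, ()): danger[d] -= 1   (the key is present whenever t was on the stack)
def decOpp (odict : PySem.Dict Char (List Char)) (dng : PySem.Dict Char Int) (t : Char) : PySem.Dict Char Int :=
  (odict.getD t []).foldl (fun d u => d.insert u (d.getD u 0 - 1)) dng

-- for d in opp.get(ch, ()): danger[d] = danger.get(d, 0) + 1
def incOpp (odict : PySem.Dict Char (List Char)) (dng : PySem.Dict Char Int) (x : Char) : PySem.Dict Char Int :=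
  (odict.getD x []).foldl (fun d u => d.insert u (d.getD u 0 + 1)) dng

-- if stack and danger.get(ch, 0) > 0: wipe; else push ch and raise the danger of its opponents
def pushB (odict : PySem.Dict Char (List Char)) (stack : List Char)
    (dng : PySem.Dict Char Int) (x : Char) : List Char × PySem.Dict Char Int :=
  if stack ≠ [] ∧ 0 < dng.getD x 0 then ([], PySem.Dict.empty)
  else (stack ++ [x], incOpp odict dng x)

-- body of B's loop: combine the new char with the old top via one dict lookup (popping the top
-- and lowering the danger its opponents contributed), then the pre-push danger test
def stepB (cdict : PySem.Dict (Char × Char) Char) (odict : PySem.Dict Char (List Char))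
    (st : List Char × PySem.Dict Char Int) (ch : Char) : List Char × PySem.Dict Char Int :=
  match st.1.getLast? with                   -- `if stack and ch + stack[-1] in comb`
  | none => pushB odict st.1 st.2 ch
  | some t =>
    match cdict.get? (ch, t) with
    | none => pushB odict st.1 st.2 ch
    | some r => pushB odict st.1.dropLast (decOpp odict st.2 t) r

def solve_me_alt (c_list : List String) (o_list : List String) (spell : String) : String :=
  let cdict := buildC c_list
  let odict := buildO o_list
  let fin := spell.toList.foldl (stepB cdict odict) ([], PySem.Dict.empty)
  String.mk ('[' :: PySem.Chars.join [',', ' '] (fin.1.map (fun c => [c])) ++ [']'])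

-- ===== PRECONDITION & SPEC =====
-- For spells of length ≥ 2, Pre_ excludes: combine strings with < 3 chars and oppose strings
-- with < 2 chars (A raises IndexError whenever it reaches the missing position, while B skips
-- such malformed rules; where A does return, it never applied the rule and B agrees with it);
-- duplicate unordered combine pairs (A raises IndexError via its stale delete indices whenever
-- such a pair matches, and where it does return, B returns the same value); and self-opposed
-- rules o[0] = o[1], an unspecified corner on which A clearing the stack accidentally depends
-- on the stack length.  Both restrictions are only imposed on rules whose characters are
-- reachable (RMem: a spell character, or the result character of a rule that produces a
-- character distinct from its pair — the stack only ever holds such characters); rules that can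
-- never fire are unconstrained.  Spells of length ≤ 1 never exercise any rule: all admitted.
def RMem (c_list : List String) (spell : String) (x : Char) : Prop :=
  x ∈ spell.toList ∨ ∃ c ∈ c_list, chA c 2 = x ∧ chA c 2 ≠ chA c 0 ∧ chA c 2 ≠ chA c 1

def Pre_solve_me (c_list : List String) (o_list : List String) (spell : String) : Prop :=
  spell.toList.length ≤ 1 ∨
  ((∀ c ∈ c_list, 3 ≤ c.toList.length) ∧
   (∀ o ∈ o_list, 2 ≤ o.toList.length) ∧
   (∀ o ∈ o_list, chA o 0 ≠ chA o 1 ∨ ¬ RMem c_list spell (chA o 0)) ∧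
   c_list.Pairwise (fun c d =>
     ¬ RMem c_list spell (chA c 0) ∨ ¬ RMem c_list spell (chA c 1) ∨
     ¬((chA c 0 = chA d 0 ∧ chA c 1 = chA d 1) ∨ (chA c 0 = chA d 1 ∧ chA c 1 = chA d 0))))

instance (c_list : List String) (o_list : List String) (spell : String) :
    Decidable (Pre_solve_me c_list o_list spell) := by
  unfold Pre_solve_me RMem; infer_instance

def pvWitness_solve_me : List String × List String × String := (["QWE", "QRW"], ["QR"], "QQWRE")

def Spec_solve_me (c_list : List String) (o_list : List String) (spell : String) (out : String) : Prop := out = solve_me_alt c_list o_list spell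
instance (c_list : List String) (o_list : List String) (spell : String) (out : String) : Decidable (Spec_solve_me c_list o_list spell out) := by unfold Spec_solve_me; infer_instance

-- ===== CLAIM (what is proved, stated in full; the proofs are below) =====
def Claim_equal_solve_me : Prop := ∀ (c_list : List String) (o_list : List String) (spell : String), Dom_solve_me c_list o_list spell → Pre_solve_me c_list o_list spell → Spec_solve_me c_list o_list spell (solve_me c_list o_list spell)

-- ===== LEMMAS AND PROOFS =====

theorem fmt_go (lenny : Nat) : ∀ (rest acc : List Char) (k : Nat), k + rest.length = lenny + 1 →
    (rest.foldl (fun (p : List Char × Nat) l =>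
      let stringy := p.1 ++ [l]
      let stringy := if p.2 < lenny then stringy ++ [',', ' '] else stringy
      (stringy, p.2 + 1)) (acc, k)).1
    = acc ++ PySem.Chars.join [',', ' '] (rest.map (fun c => [c])) := by
  intro rest
  induction rest with
  | nil => intro acc k h; simp [PySem.Chars.join_nil]
  | cons l rest ih =>
    intro acc k h
    cases rest with
    | nil =>
      have hk : ¬ k < lenny := by simp at h; omega
      simp [List.foldl, hk, PySem.Chars.join_singleton]
    | cons q rs =>
      have hk : k < lenny := by simp at h; omega
      have h2 : (k+1) + (q :: rs).length = lenny + 1 := by simp at h ⊢; omega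
      have := ih (acc ++ [l] ++ [',', ' ']) (k+1) h2
      simp only [List.foldl, hk, if_pos, List.map] at this ⊢
      rw [this, PySem.Chars.join_cons_cons]
      simp

theorem fmt_eq (l : List Char) :
    fmtA l = String.mk ('[' :: PySem.Chars.join [',', ' '] (l.map (fun c => [c])) ++ [']']) := by
  show String.mk ((l.foldl (fun (p : List Char × Nat) x =>
      let stringy := p.1 ++ [x]
      let stringy := if p.2 < l.length then stringy ++ [',', ' '] else stringy
      (stringy, p.2 + 1)) (['['], 1)).1 ++ [']']) = _
  rw [fmt_go l.length l ['['] 1 (by omega)]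
  simp

def PairDistinct (c_list : List String) (spell : String) (c d : String) : Prop :=
  ¬ RMem c_list spell (chA c 0) ∨ ¬ RMem c_list spell (chA c 1) ∨
  ¬((chA c 0 = chA d 0 ∧ chA c 1 = chA d 1) ∨ (chA c 0 = chA d 1 ∧ chA c 1 = chA d 0))

theorem match_unique {c_list : List String} {spell : String} {a b : Char} {c d : String}
    (haR : RMem c_list spell a) (hbR : RMem c_list spell b)
    (h1 : (a = chA c 0 ∧ b = chA c 1) ∨ (a = chA c 1 ∧ b = chA c 0))
    (h2 : (a = chA d 0 ∧ b = chA d 1) ∨ (a = chA d 1 ∧ b = chA d 0)) :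
    ¬ PairDistinct c_list spell c d := by
  unfold PairDistinct
  intro hpd
  have hc0 : RMem c_list spell (chA c 0) := by
    rcases h1 with ⟨x, _⟩ | ⟨_, y⟩
    · exact x ▸ haR
    · exact y ▸ hbR
  have hc1 : RMem c_list spell (chA c 1) := by
    rcases h1 with ⟨_, y⟩ | ⟨x, _⟩
    · exact y ▸ hbR
    · exact x ▸ haR
  rcases hpd with h | h | h
  · exact h hc0
  · exact h hc1
  · apply h
    rcases h1 with ⟨h1a, h1b⟩ | ⟨h1a, h1b⟩ <;> rcases h2 with ⟨h2a, h2b⟩ | ⟨h2a, h2b⟩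
    · exact Or.inl ⟨by rw [← h1a, h2a], by rw [← h1b, h2b]⟩
    · exact Or.inr ⟨by rw [← h1a, h2a], by rw [← h1b, h2b]⟩
    · exact Or.inr ⟨by rw [← h1b, h2b], by rw [← h1a, h2a]⟩
    · exact Or.inl ⟨by rw [← h1b, h2b], by rw [← h1a, h2a]⟩

theorem matchC_iff (a b : Char) (c : String) :
    ((a = chA c 0 ∧ b = chA c 1) ∨ (a = chA c 1 ∧ b = chA c 0)) ↔ ((a, b) = (chA c 0, chA c 1) ∨ (a, b) = (chA c 1, chA c 0)) := by
  constructor <;> intro h <;> rcases h with h | h <;>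
    [left; right; left; right] <;> simp_all

theorem buildC_go (c_list : List String) (spell : String) (a b : Char)
    (haR : RMem c_list spell a) (hbR : RMem c_list spell b) :
    ∀ (cs : List String) (d : PySem.Dict (Char × Char) Char),
    cs.Pairwise (PairDistinct c_list spell) → (∀ c ∈ cs, 3 ≤ c.toList.length) →
    (cs.foldl (fun d c =>
      if 3 ≤ c.toList.length then
        (d.insert (chA c 0, chA c 1) (chA c 2)).insert (chA c 1, chA c 0) (chA c 2)
      else d) d).get? (a, b)
    = match cs.find? (fun c => decide ((a = chA c 0 ∧ b = chA c 1) ∨ (a = chA c 1 ∧ b = chA c 0))) with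
      | some c => some (chA c 2)
      | none => d.get? (a, b) := by
  intro cs
  induction cs with
  | nil => intro d _ _; simp
  | cons c cs ih =>
    intro d hpw hlen
    have hlc : 3 ≤ c.toList.length := hlen c List.mem_cons_self
    have hlens : ∀ c' ∈ cs, 3 ≤ c'.toList.length :=
      fun c' hc' => hlen c' (List.mem_cons_of_mem _ hc')
    rw [List.pairwise_cons] at hpw
    by_cases hm : (a = chA c 0 ∧ b = chA c 1) ∨ (a = chA c 1 ∧ b = chA c 0)
    · have hnone : cs.find? (fun c => decide ((a = chA c 0 ∧ b = chA c 1) ∨ (a = chA c 1 ∧ b = chA c 0))) = none := by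
        rw [List.find?_eq_none]
        intro d' hd'
        simp only [decide_eq_true_eq]
        intro hm'
        exact match_unique haR hbR hm hm' (hpw.1 d' hd')
      simp only [List.foldl, List.find?, hm, decide_true, if_pos hlc]
      rw [ih _ hpw.2 hlens, hnone]
      rcases (matchC_iff a b c).1 hm with h | h
      · rw [PySem.Dict.get?_insert, PySem.Dict.get?_insert]
        by_cases he : (a, b) = (chA c 1, chA c 0) <;> simp [he, h]
      · rw [PySem.Dict.get?_insert]
        simp [h]
    · have h1 : (a, b) ≠ (chA c 0, chA c 1) := by
        intro h; exact hm ((matchC_iff a b c).2 (Or.inl h))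
      have h2 : (a, b) ≠ (chA c 1, chA c 0) := by
        intro h; exact hm ((matchC_iff a b c).2 (Or.inr h))
      simp only [List.foldl, List.find?, hm, decide_false, if_pos hlc]
      rw [ih _ hpw.2 hlens]
      cases cs.find? (fun c => decide ((a = chA c 0 ∧ b = chA c 1) ∨ (a = chA c 1 ∧ b = chA c 0))) with
      | some c' => rfl
      | none => rw [PySem.Dict.get?_insert, PySem.Dict.get?_insert, if_neg h2, if_neg h1]

-- A's oppose fold clears iff some rule has both elements present
theorem oppose_fold_nil (o_list : List String) :
    o_list.foldl (fun acc o => if chA o 0 ∈ acc ∧ chA o 1 ∈ acc then [] else acc) ([] : List Char)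
      = [] := by
  induction o_list with
  | nil => rfl
  | cons o os ih => simpa using ih

theorem oppose_fold (o_list : List String) (st : List Char) :
    o_list.foldl (fun acc o => if chA o 0 ∈ acc ∧ chA o 1 ∈ acc then [] else acc) st
    = if ∃ o ∈ o_list, chA o 0 ∈ st ∧ chA o 1 ∈ st then [] else st := by
  induction o_list generalizing st with
  | nil => simp
  | cons o os ih =>
    by_cases h : chA o 0 ∈ st ∧ chA o 1 ∈ st
    · simp only [List.foldl, if_pos h, oppose_fold_nil]
      rw [if_pos ⟨o, List.mem_cons_self, h⟩]
    · simp only [List.foldl, if_neg h]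
      rw [ih]
      congr 1
      simp only [List.mem_cons, eq_iff_iff]
      constructor
      · rintro ⟨o', ho', hh⟩; exact ⟨o', Or.inr ho', hh⟩
      · rintro ⟨o', ho' | ho', hh⟩
        · exact absurd (ho' ▸ hh) h
        · exact ⟨o', ho', hh⟩

theorem combine_fold_no_match (a b : Char) (l : Nat) :
    ∀ (cs : List String) (acc : List Char), (∀ c ∈ cs, ¬ ((a = chA c 0 ∧ b = chA c 1) ∨ (a = chA c 1 ∧ b = chA c 0))) →
    cs.foldl (fun acc c => if (a = chA c 0 ∧ b = chA c 1) ∨ (a = chA c 1 ∧ b = chA c 0) then ((acc.eraseIdx (l-1)).eraseIdx (l-2)) ++ [chA c 2]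
      else acc) acc = acc := by
  intro cs
  induction cs with
  | nil => intro acc _; rfl
  | cons c cs ih =>
    intro acc h
    simp only [List.foldl, if_neg (h c List.mem_cons_self)]
    exact ih acc (fun c' hc' => h c' (List.mem_cons_of_mem _ hc'))

theorem combine_fold (c_list : List String) (spell : String) (a b : Char)
    (haR : RMem c_list spell a) (hbR : RMem c_list spell b)
    (l : Nat) (cs : List String) (st1 : List Char)
    (hpw : cs.Pairwise (PairDistinct c_list spell)) :
    cs.foldl (fun acc c => if (a = chA c 0 ∧ b = chA c 1) ∨ (a = chA c 1 ∧ b = chA c 0) then ((acc.eraseIdx (l-1)).eraseIdx (l-2)) ++ [chA c 2]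
      else acc) st1
    = match cs.find? (fun c => decide ((a = chA c 0 ∧ b = chA c 1) ∨ (a = chA c 1 ∧ b = chA c 0))) with
      | some c => ((st1.eraseIdx (l-1)).eraseIdx (l-2)) ++ [chA c 2]
      | none => st1 := by
  induction cs with
  | nil => rfl
  | cons c cs ih =>
    rw [List.pairwise_cons] at hpw
    by_cases hm : (a = chA c 0 ∧ b = chA c 1) ∨ (a = chA c 1 ∧ b = chA c 0)
    · simp only [List.foldl, List.find?, hm, if_pos, decide_true]
      exact combine_fold_no_match a b l cs _
        (fun c' hc' hm' => match_unique haR hbR hm hm' (hpw.1 c' hc'))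
    · simp only [List.foldl, List.find?, hm, if_neg, decide_false]
      exact ih hpw.2

theorem buildO_mem (o_list : List String) (hP2 : ∀ o ∈ o_list, 2 ≤ o.toList.length)
    (t u : Char) :
    u ∈ (buildO o_list).getD t [] ↔
      ∃ o ∈ o_list, (t = chA o 0 ∧ u = chA o 1) ∨ (t = chA o 1 ∧ u = chA o 0) := by
  unfold buildO
  dsimp only
  rw [List.filter_eq_self.2 (fun o ho => by simpa using hP2 o ho)]
  rw [PySem.Dict.getD_foldl_modify_append]
  simp only [PySem.Dict.getD_empty, List.nil_append, List.mem_map, List.mem_filter,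
    List.mem_append, List.mem_map, beq_iff_eq]
  constructor
  · rintro ⟨⟨x, y⟩, ⟨⟨o, ho, hxy⟩ | ⟨o, ho, hxy⟩, hx⟩, hu⟩
    · exact ⟨o, ho, Or.inl ⟨by simp_all [Prod.ext_iff], by simp_all [Prod.ext_iff]⟩⟩
    · exact ⟨o, ho, Or.inr ⟨by simp_all [Prod.ext_iff], by simp_all [Prod.ext_iff]⟩⟩
  · rintro ⟨o, ho, ⟨ht, hu⟩ | ⟨ht, hu⟩⟩
    · exact ⟨(chA o 0, chA o 1), ⟨Or.inl ⟨o, ho, rfl⟩, ht.symm⟩, hu.symm⟩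
    · exact ⟨(chA o 1, chA o 0), ⟨Or.inr ⟨o, ho, rfl⟩, ht.symm⟩, hu.symm⟩

-- ----- the danger-index invariant of B -----

-- number of elements of st opposed to k (with rule multiplicity)
def DCnt (odict : PySem.Dict Char (List Char)) (st : List Char) (k : Char) : Nat :=
  (st.map (fun u => (odict.getD u []).count k)).sum

def InvD (odict : PySem.Dict Char (List Char)) (st : List Char) (dng : PySem.Dict Char Int) : Prop :=
  ∀ k, dng.getD k 0 = (DCnt odict st k : Int)

def NoOpp (o_list : List String) (st : List Char) : Prop :=
  ∀ o ∈ o_list, ¬(chA o 0 ∈ st ∧ chA o 1 ∈ st)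

theorem getD_foldl_insert_sub_one (l : List Char) (d : PySem.Dict Char Int) (k : Char) :
    (l.foldl (fun d u => d.insert u (d.getD u 0 - 1)) d).getD k 0
      = d.getD k 0 - (l.count k : Int) := by
  induction l generalizing d with
  | nil => simp
  | cons u l ih =>
    simp only [List.foldl, ih, PySem.Dict.getD_insert, List.count_cons]
    by_cases hk : k = u
    · subst hk
      simp only [if_pos rfl, beq_self_eq_true, if_pos]
      push_cast
      ring
    · have : (u == k) = false := by simpa using (Ne.symm hk)
      simp [hk, this]

theorem DCnt_pos_iff (odict : PySem.Dict Char (List Char)) (st : List Char) (k : Char) :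
    0 < DCnt odict st k ↔ ∃ u ∈ st, k ∈ odict.getD u [] := by
  induction st with
  | nil => simp [DCnt]
  | cons u st ih =>
    unfold DCnt at *
    simp only [List.map_cons, List.sum_cons, List.mem_cons]
    constructor
    · intro h
      rcases Nat.lt_or_ge 0 ((odict.getD u []).count k) with hc | hc
      · exact ⟨u, Or.inl rfl, List.count_pos_iff.1 hc⟩
      · have : 0 < (st.map (fun u => (odict.getD u []).count k)).sum := by omega
        obtain ⟨v, hv, hk⟩ := ih.1 this
        exact ⟨v, Or.inr hv, hk⟩
    · rintro ⟨v, hv | hv, hk⟩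
      · subst hv
        have := List.count_pos_iff.2 hk
        omega
      · have := ih.2 ⟨v, hv, hk⟩
        omega

theorem InvD_empty (odict : PySem.Dict Char (List Char)) : InvD odict [] PySem.Dict.empty := by
  intro k; simp [DCnt, PySem.Dict.getD_empty]

theorem InvD_push (odict : PySem.Dict Char (List Char)) (st : List Char)
    (dng : PySem.Dict Char Int) (x : Char) (h : InvD odict st dng) :
    InvD odict (st ++ [x]) (incOpp odict dng x) := by
  intro k
  unfold incOpp
  rw [PySem.Dict.getD_foldl_insert_add_one, h k]
  unfold DCnt
  simp only [List.map_append, List.sum_append, List.map_cons, List.map_nil, List.sum_cons,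
    List.sum_nil]
  push_cast
  ring

theorem InvD_pop (odict : PySem.Dict Char (List Char)) (st : List Char) (h : st ≠ [])
    (dng : PySem.Dict Char Int) (hi : InvD odict st dng) :
    InvD odict st.dropLast (decOpp odict dng (st.getLast h)) := by
  intro k
  unfold decOpp
  rw [getD_foldl_insert_sub_one, hi k]
  have hsplit : st.dropLast ++ [st.getLast h] = st := List.dropLast_append_getLast h
  have : DCnt odict st k = DCnt odict st.dropLast k + (odict.getD (st.getLast h) []).count k := by
    conv_lhs => rw [← hsplit]
    unfold DCnt
    simp
  rw [this]
  push_cast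
  ring

theorem noopp_small (c_list o_list : List String) (spell : String)
    (hP4 : ∀ o ∈ o_list, chA o 0 ≠ chA o 1 ∨ ¬ RMem c_list spell (chA o 0))
    (st : List Char) (hR : ∀ x ∈ st, RMem c_list spell x) (hlen : st.length ≤ 1) :
    NoOpp o_list st := by
  intro o ho ⟨h0, h1⟩
  rcases hP4 o ho with hne | hnr
  · match st, hlen with
    | [], _ => exact absurd h0 (List.not_mem_nil)
    | [x], _ =>
      rw [List.mem_singleton] at h0 h1
      exact hne (h0.trans h1.symm)
  · exact hnr (hR _ h0)

def finishA (o_list : List String) (st2 : List Char) : List Char :=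
  if 1 < st2.length ∧ 0 < o_list.length then
    o_list.foldl (fun acc o => if chA o 0 ∈ acc ∧ chA o 1 ∈ acc then [] else acc) st2
  else st2

theorem push_finish (c_list o_list : List String) (spell : String)
    (hP2 : ∀ o ∈ o_list, 2 ≤ o.toList.length)
    (hP4 : ∀ o ∈ o_list, chA o 0 ≠ chA o 1 ∨ ¬ RMem c_list spell (chA o 0))
    (st pre : List Char) (x : Char) (dng : PySem.Dict Char Int)
    (hsub : ∀ y ∈ pre, y ∈ st) (hstR : ∀ y ∈ st, RMem c_list spell y)
    (hxR : RMem c_list spell x) (hn : NoOpp o_list st)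
    (hinv : InvD (buildO o_list) pre dng) :
    finishA o_list (pre ++ [x]) = (pushB (buildO o_list) pre dng x).1
    ∧ InvD (buildO o_list) (finishA o_list (pre ++ [x])) (pushB (buildO o_list) pre dng x).2
    ∧ NoOpp o_list (finishA o_list (pre ++ [x])) := by
  have hR2 : ∀ y ∈ pre ++ [x], RMem c_list spell y := by
    intro y hy
    rcases List.mem_append.1 hy with hy | hy
    · exact hstR y (hsub y hy)
    · rw [List.mem_singleton] at hy; exact hy ▸ hxR
  have hn' : NoOpp o_list pre := fun o ho h => hn o ho ⟨hsub _ h.1, hsub _ h.2⟩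
  by_cases hpre : pre = []
  · subst hpre
    have hA : finishA o_list ([] ++ [x]) = [x] := by simp [finishA]
    have hB : pushB (buildO o_list) [] dng x = ([x], incOpp (buildO o_list) dng x) := by
      simp [pushB]
    rw [hA, hB]
    exact ⟨rfl, InvD_push (buildO o_list) [] dng x hinv,
      noopp_small c_list o_list spell hP4 [x] (by simpa using hR2) (by simp)⟩
  · -- pre nonempty: both sides test the wipe condition
    have hdpos : (0 < dng.getD x 0) ↔ ∃ u ∈ pre, x ∈ (buildO o_list).getD u [] := by
      rw [hinv x, Int.natCast_pos, DCnt_pos_iff]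
    have hiff : (∃ o ∈ o_list, chA o 0 ∈ pre ++ [x] ∧ chA o 1 ∈ pre ++ [x]) ↔
        0 < dng.getD x 0 := by
      rw [hdpos]
      constructor
      · rintro ⟨o, ho, h0, h1⟩
        have hne : chA o 0 ≠ chA o 1 := by
          rcases hP4 o ho with hne | hnr
          · exact hne
          · exact absurd (hR2 _ h0) hnr
        rcases List.mem_append.1 h0 with h0p | h0t
        · rcases List.mem_append.1 h1 with h1p | h1t
          · exact absurd ⟨h0p, h1p⟩ (hn' o ho)
          · rw [List.mem_singleton] at h1t
            refine ⟨chA o 0, h0p, ?_⟩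
            rw [buildO_mem o_list hP2]
            exact ⟨o, ho, Or.inl ⟨rfl, h1t.symm⟩⟩
        · rw [List.mem_singleton] at h0t
          rcases List.mem_append.1 h1 with h1p | h1t
          · refine ⟨chA o 1, h1p, ?_⟩
            rw [buildO_mem o_list hP2]
            exact ⟨o, ho, Or.inr ⟨rfl, h0t.symm⟩⟩
          · rw [List.mem_singleton] at h1t
            exact absurd (h0t.trans h1t.symm) hne
      · rintro ⟨u, hu, hx⟩
        rw [buildO_mem o_list hP2] at hx
        rcases hx with ⟨o, ho, ⟨ht, hxx⟩ | ⟨ht, hxx⟩⟩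
        · exact ⟨o, ho, ht ▸ List.mem_append_left _ hu,
            hxx ▸ List.mem_append_right _ (List.mem_singleton_self x)⟩
        · exact ⟨o, ho, hxx ▸ List.mem_append_right _ (List.mem_singleton_self x),
            ht ▸ List.mem_append_left _ hu⟩
    have hgl : 1 < (pre ++ [x]).length := by
      have := List.length_pos_iff.2 hpre; simp; omega
    have hA : finishA o_list (pre ++ [x]) =
        if ∃ o ∈ o_list, chA o 0 ∈ pre ++ [x] ∧ chA o 1 ∈ pre ++ [x] then [] else pre ++ [x] := by
      unfold finishA
      by_cases hol : 0 < o_list.length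
      · rw [if_pos ⟨hgl, hol⟩, oppose_fold]
      · have : o_list = [] := List.length_eq_zero_iff.1 (by omega)
        subst this; simp
    have hB : pushB (buildO o_list) pre dng x =
        if 0 < dng.getD x 0 then ([], PySem.Dict.empty)
        else (pre ++ [x], incOpp (buildO o_list) dng x) := by
      unfold pushB
      simp [hpre]
    rw [hA, hB]
    by_cases hcond : ∃ o ∈ o_list, chA o 0 ∈ pre ++ [x] ∧ chA o 1 ∈ pre ++ [x]
    · rw [if_pos hcond, if_pos (hiff.1 hcond)]
      exact ⟨rfl, InvD_empty _, fun o ho h => absurd h.1 (List.not_mem_nil)⟩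
    · rw [if_neg hcond, if_neg (fun h => hcond (hiff.2 h))]
      exact ⟨rfl, InvD_push _ pre dng x hinv, fun o ho h => hcond ⟨o, ho, h⟩⟩

theorem getD_concat_self (st : List Char) (s d : Char) : (st ++ [s]).getD st.length d = s := by
  rw [List.getD_eq_getElem?_getD, List.getElem?_concat_length]; rfl

theorem getD_concat_pred (st : List Char) (s d : Char) (h : st ≠ []) :
    (st ++ [s]).getD (st.length - 1) d = st.getLast h := by
  have hp : 0 < st.length := List.length_pos_iff.2 h
  rw [List.getD_eq_getElem?_getD, List.getElem?_append_left (by omega),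
    List.getElem?_eq_getElem (by omega)]
  simp [List.getLast_eq_getElem]

theorem erase2_concat (st : List Char) (s : Char) :
    ((st ++ [s]).eraseIdx ((st ++ [s]).length - 1)).eraseIdx ((st ++ [s]).length - 2)
      = st.dropLast := by
  rw [List.eraseIdx_length_sub_one]
  have h1 : (st ++ [s]).dropLast = st := by simp
  rw [h1]
  have h2 : (st ++ [s]).length - 2 = st.length - 1 := by simp
  rw [h2, List.eraseIdx_length_sub_one]

theorem stepA_empty (c_list o_list : List String) (s : Char) :
    stepA c_list o_list [] s = finishA o_list ([] ++ [s]) := by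
  simp [stepA, finishA]

theorem stepA_cons (c_list o_list : List String) (spell : String) (st : List Char)
    (h : st ≠ []) (s : Char)
    (hsR : RMem c_list spell s) (hbR : RMem c_list spell (st.getLast h))
    (hpw : c_list.Pairwise (PairDistinct c_list spell)) :
    stepA c_list o_list st s = finishA o_list
      (match c_list.find? (fun c => decide ((s = chA c 0 ∧ st.getLast h = chA c 1)
          ∨ (s = chA c 1 ∧ st.getLast h = chA c 0))) with
        | some c => st.dropLast ++ [chA c 2]
        | none => st ++ [s]) := by
  have hp : 0 < st.length := List.length_pos_iff.2 h
  have hlen : (st ++ [s]).length = st.length + 1 := by simp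
  have hgl : 1 < (st ++ [s]).length := by omega
  unfold stepA
  dsimp only
  have ha : (st ++ [s]).getD ((st ++ [s]).length - 1) ' ' = s := by
    rw [hlen]; simpa using getD_concat_self st s ' '
  have hb : (st ++ [s]).getD ((st ++ [s]).length - 2) ' ' = st.getLast h := by
    rw [hlen]
    have : st.length + 1 - 2 = st.length - 1 := by omega
    rw [this, getD_concat_pred st s ' ' h]
  have hX : (if 1 < (st ++ [s]).length ∧ 0 < c_list.length then
      c_list.foldl (fun acc c =>
        if ((st ++ [s]).getD ((st ++ [s]).length - 1) ' ' = chA c 0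
              ∧ (st ++ [s]).getD ((st ++ [s]).length - 2) ' ' = chA c 1)
            ∨ ((st ++ [s]).getD ((st ++ [s]).length - 1) ' ' = chA c 1
              ∧ (st ++ [s]).getD ((st ++ [s]).length - 2) ' ' = chA c 0) then
          ((acc.eraseIdx ((st ++ [s]).length - 1)).eraseIdx ((st ++ [s]).length - 2)) ++ [chA c 2]
        else acc) (st ++ [s])
    else st ++ [s]) =
      (match c_list.find? (fun c => decide ((s = chA c 0 ∧ st.getLast h = chA c 1)
          ∨ (s = chA c 1 ∧ st.getLast h = chA c 0))) with
        | some c => st.dropLast ++ [chA c 2]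
        | none => st ++ [s]) := by
    by_cases hcl : 0 < c_list.length
    · rw [if_pos ⟨hgl, hcl⟩]
      simp only [ha, hb]
      rw [combine_fold c_list spell _ _ hsR hbR _ _ _ hpw]
      cases hf : c_list.find? (fun c => decide ((s = chA c 0 ∧ st.getLast h = chA c 1)
          ∨ (s = chA c 1 ∧ st.getLast h = chA c 0))) with
      | some c => rw [erase2_concat]
      | none => rfl
    · have : c_list = [] := List.length_eq_zero_iff.1 (by omega)
      subst this
      rw [if_neg (by simp)]
      rfl
  rw [hX]
  rfl

theorem buildC_get? (c_list : List String) (spell : String) (a b : Char)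
    (haR : RMem c_list spell a) (hbR : RMem c_list spell b)
    (hpw : c_list.Pairwise (PairDistinct c_list spell))
    (hP1 : ∀ c ∈ c_list, 3 ≤ c.toList.length) :
    (buildC c_list).get? (a, b)
    = match c_list.find? (fun c => decide ((a = chA c 0 ∧ b = chA c 1) ∨ (a = chA c 1 ∧ b = chA c 0))) with
      | some c => some (chA c 2)
      | none => none := by
  unfold buildC
  rw [buildC_go c_list spell a b haR hbR c_list _ hpw hP1]
  cases c_list.find? (fun c => decide ((a = chA c 0 ∧ b = chA c 1) ∨ (a = chA c 1 ∧ b = chA c 0))) with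
  | some c => rfl
  | none => simp [PySem.Dict.get?_empty]

theorem finishA_reach (c_list o_list : List String) (spell : String)
    (st pre : List Char) (t : Char)
    (hsub : ∀ x ∈ pre, x ∈ st) (hstR : ∀ x ∈ st, RMem c_list spell x)
    (htR : RMem c_list spell t) :
    ∀ x ∈ finishA o_list (pre ++ [t]), RMem c_list spell x := by
  intro x hx
  have hR2 : ∀ y ∈ pre ++ [t], RMem c_list spell y := by
    intro y hy
    rcases List.mem_append.1 hy with hy | hy
    · exact hstR y (hsub y hy)
    · rw [List.mem_singleton] at hy; exact hy ▸ htR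
  unfold finishA at hx
  split at hx
  · rw [oppose_fold] at hx
    split at hx
    · exact absurd hx (List.not_mem_nil)
    · exact hR2 x hx
  · exact hR2 x hx

theorem step_eq (c_list o_list : List String) (spell : String)
    (hpw : c_list.Pairwise (PairDistinct c_list spell))
    (hP1 : ∀ c ∈ c_list, 3 ≤ c.toList.length)
    (hP2 : ∀ o ∈ o_list, 2 ≤ o.toList.length)
    (hP4 : ∀ o ∈ o_list, chA o 0 ≠ chA o 1 ∨ ¬ RMem c_list spell (chA o 0))
    (st : List Char) (dng : PySem.Dict Char Int) (hinv : InvD (buildO o_list) st dng)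
    (hstR : ∀ x ∈ st, RMem c_list spell x) (hn : NoOpp o_list st)
    (s : Char) (hsR : RMem c_list spell s) :
    stepA c_list o_list st s = (stepB (buildC c_list) (buildO o_list) (st, dng) s).1
    ∧ InvD (buildO o_list) (stepA c_list o_list st s) (stepB (buildC c_list) (buildO o_list) (st, dng) s).2
    ∧ (∀ x ∈ stepA c_list o_list st s, RMem c_list spell x)
    ∧ NoOpp o_list (stepA c_list o_list st s) := by
  by_cases h : st = []
  · subst h
    rw [stepA_empty]
    have hB : stepB (buildC c_list) (buildO o_list) ([], dng) s
        = pushB (buildO o_list) [] dng s := rfl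
    rw [hB]
    obtain ⟨h1, h2, h3⟩ := push_finish c_list o_list spell hP2 hP4 [] [] s dng (by simp)
      (by simp) hsR hn hinv
    exact ⟨h1, h2, finishA_reach c_list o_list spell [] [] s (by simp) (by simp) hsR, h3⟩
  · have hbR : RMem c_list spell (st.getLast h) := hstR _ (List.getLast_mem h)
    rw [stepA_cons c_list o_list spell st h s hsR hbR hpw]
    have htop : st.getLast? = some (st.getLast h) := List.getLast?_eq_getLast h
    have hget := buildC_get? c_list spell s (st.getLast h) hsR hbR hpw hP1
    cases hf : c_list.find? (fun c => decide ((s = chA c 0 ∧ st.getLast h = chA c 1)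
        ∨ (s = chA c 1 ∧ st.getLast h = chA c 0))) with
    | none =>
      have hB : stepB (buildC c_list) (buildO o_list) (st, dng) s
          = pushB (buildO o_list) st dng s := by
        unfold stepB
        rw [htop]
        dsimp only
        rw [hget, hf]
      rw [hB]
      obtain ⟨h1, h2, h3⟩ := push_finish c_list o_list spell hP2 hP4 st st s dng
        (fun x hx => hx) hstR hsR hn hinv
      exact ⟨h1, h2, finishA_reach c_list o_list spell st st s
        (fun x hx => hx) hstR hsR, h3⟩
    | some c =>
      have hcmem : c ∈ c_list := List.mem_of_find?_eq_some hf
      have hcm : (s = chA c 0 ∧ st.getLast h = chA c 1)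
          ∨ (s = chA c 1 ∧ st.getLast h = chA c 0) := by
        have := List.find?_some hf
        simpa using this
      have hrR : RMem c_list spell (chA c 2) := by
        by_cases h0 : chA c 2 = chA c 0
        · rcases hcm with ⟨ha, _⟩ | ⟨_, hb⟩
          · exact (h0.trans ha.symm) ▸ hsR
          · exact (h0.trans hb.symm) ▸ hbR
        · by_cases h1 : chA c 2 = chA c 1
          · rcases hcm with ⟨_, hb⟩ | ⟨ha, _⟩
            · exact (h1.trans hb.symm) ▸ hbR
            · exact (h1.trans ha.symm) ▸ hsR
          · exact Or.inr ⟨c, hcmem, rfl, h0, h1⟩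
      have hB : stepB (buildC c_list) (buildO o_list) (st, dng) s
          = pushB (buildO o_list) st.dropLast (decOpp (buildO o_list) dng (st.getLast h))
              (chA c 2) := by
        unfold stepB
        rw [htop]
        dsimp only
        rw [hget, hf]
      rw [hB]
      obtain ⟨h1, h2, h3⟩ := push_finish c_list o_list spell hP2 hP4 st st.dropLast (chA c 2)
        (decOpp (buildO o_list) dng (st.getLast h))
        (fun x hx => (List.dropLast_sublist st).mem hx) hstR hrR hn
        (InvD_pop (buildO o_list) st h dng hinv)
      exact ⟨h1, h2, finishA_reach c_list o_list spell st st.dropLast (chA c 2)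
        (fun x hx => (List.dropLast_sublist st).mem hx) hstR hrR, h3⟩

theorem fold_eq (c_list o_list : List String) (spell : String)
    (hpw : c_list.Pairwise (PairDistinct c_list spell))
    (hP1 : ∀ c ∈ c_list, 3 ≤ c.toList.length)
    (hP2 : ∀ o ∈ o_list, 2 ≤ o.toList.length)
    (hP4 : ∀ o ∈ o_list, chA o 0 ≠ chA o 1 ∨ ¬ RMem c_list spell (chA o 0)) :
    ∀ (chars : List Char) (st : List Char) (dng : PySem.Dict Char Int),
      (∀ x ∈ chars, x ∈ spell.toList) →
      InvD (buildO o_list) st dng → (∀ x ∈ st, RMem c_list spell x) → NoOpp o_list st →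
      chars.foldl (stepA c_list o_list) st
        = (chars.foldl (stepB (buildC c_list) (buildO o_list)) (st, dng)).1 := by
  intro chars
  induction chars with
  | nil => intro st dng _ _ _ _; rfl
  | cons s rest ih =>
    intro st dng hchars hinv hstR hn
    obtain ⟨he, hci, hri, hni⟩ := step_eq c_list o_list spell hpw hP1 hP2 hP4 st dng hinv hstR hn s
      (Or.inl (hchars s List.mem_cons_self))
    simp only [List.foldl]
    rw [he] at hci hri hni ⊢
    have := ih (stepB (buildC c_list) (buildO o_list) (st, dng) s).1
      (stepB (buildC c_list) (buildO o_list) (st, dng) s).2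
      (fun x hx => hchars x (List.mem_cons_of_mem _ hx)) hci hri hni
    simpa using this

theorem solve_me_short (c_list o_list : List String) (spell : String)
    (hs : spell.toList.length ≤ 1) :
    solve_me c_list o_list spell = solve_me_alt c_list o_list spell := by
  unfold solve_me solve_me_alt
  dsimp only
  match hsp : spell.toList, hs with
  | [], _ => rw [fmt_eq]; rfl
  | [s], _ =>
    have hA : stepA c_list o_list [] s = [s] := by
      rw [stepA_empty]; simp [finishA]
    have hB : stepB (buildC c_list) (buildO o_list) ([], PySem.Dict.empty) s
        = ([s], incOpp (buildO o_list) PySem.Dict.empty s) := by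
      show pushB (buildO o_list) [] PySem.Dict.empty s = _
      simp [pushB]
    simp only [List.foldl, hA, hB]
    rw [fmt_eq]

theorem solve_me_eq (c_list o_list : List String) (spell : String)
    (hpre : Pre_solve_me c_list o_list spell) :
    solve_me c_list o_list spell = solve_me_alt c_list o_list spell := by
  rcases hpre with hs | ⟨hP1, hP2, hP4, hpw⟩
  · exact solve_me_short c_list o_list spell hs
  · unfold solve_me solve_me_alt
    dsimp only
    rw [fold_eq c_list o_list spell hpw hP1 hP2 hP4 spell.toList [] PySem.Dict.empty
      (fun x hx => hx) (InvD_empty _) (fun x hx => absurd hx (List.not_mem_nil))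
      (fun o _ hx => absurd hx.1 (List.not_mem_nil))]
    rw [fmt_eq]

-- ===== VERDICT (by name: the statement is the Claim_ definition above) =====
theorem solve_me_spec : Claim_equal_solve_me :=
  fun c_list o_list spell _ hpre => solve_me_eq c_list o_list spell hpre
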